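-- pv_equiv track=rewrite | github.com/hejialincn/db-lite | v1.0/code/word.py | get
-- ===== SOURCE A (Python) =====
-- def get(string):
--     k=[]
--     name=[]
--     type=[]
--     string=string.split(";")
--     for i in string:
--         k=i.split(",")
--         name.append(k[0])
--         type.append(k[1])
--     return([name,type])
-- ===== SOURCE B (Python) =====
-- def get(string):
--     names, types = [], []
--     rest = string
--     while True:
--         end = rest.find(";")
--         seg = rest if end == -1 else rest[:end]
--         comma = seg.index(",")
--         names.append(seg[:comma])
--         fieldrest = seg[comma + 1:]
--         nxt = fieldrest.find(",")
--         types.append(fieldrest if nxt == -1 else fieldrest[:nxt])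
--         if end == -1:
--             return [names, types]
--         rest = rest[end + 1:]
-- ===== Notes on version B (the rewrite author's own statement) =====
-- stated objective: alternative
-- what changed: Replaces A's split(';')-into-a-list, split(',')-per-segment and two append accumulators by a find/index cursor walk over the raw string that slices the name and type fields out directly, building no intermediate lists of parts.
import Mathlib
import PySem

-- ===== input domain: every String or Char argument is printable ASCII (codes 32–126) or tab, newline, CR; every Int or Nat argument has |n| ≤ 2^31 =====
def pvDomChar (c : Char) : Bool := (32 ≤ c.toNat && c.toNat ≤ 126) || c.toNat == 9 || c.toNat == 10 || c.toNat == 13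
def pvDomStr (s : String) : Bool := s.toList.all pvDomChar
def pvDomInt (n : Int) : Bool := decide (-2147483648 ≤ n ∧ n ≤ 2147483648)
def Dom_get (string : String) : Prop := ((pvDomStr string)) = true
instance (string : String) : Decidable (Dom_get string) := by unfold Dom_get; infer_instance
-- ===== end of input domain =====

-- B replaces A's split-into-lists-and-append loop by a find/slice cursor scan over the raw string (no split, no intermediate lists); alternative decomposition, same cost.


-- shared primitive: s.split(sep) for a nonempty literal sep (PySem.Str.split? is none only for sep = "", so .getD [] is exact here)
def pySplit (s sep : String) : List String := (PySem.Str.split? s sep).getD []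

-- ===== PORT A =====
-- A: split on ";", loop appending k[0] and k[1] of each segment's ","-split to two accumulators.
-- k[0]/k[1] are pyGetD with default ""; the default is never reached under Pre_get (each segment splits into ≥ 2 parts; outside Pre_ Python raises IndexError).
def get (string : String) : List (List String) :=
  let segs := pySplit string ";"
  let nt := segs.foldl
    (fun (acc : List String × List String) i =>
      let k := pySplit i ","
      (acc.1 ++ [PySem.List.pyGetD k 0 ""], acc.2 ++ [PySem.List.pyGetD k 1 ""]))
    ([], [])
  [nt.1, nt.2]

-- ===== PORT B =====
-- B: a cursor walk over the raw string with find/index and slices — no split, no intermediate lists.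
-- The loop runs on the string's character list (Python keeps `rest` a str; rest.find/rest[i:j] are Chars.find / List.slice, exact).
-- termination helper for the loop: consuming up to and past the found ';' strictly shrinks `rest`
lemma find_semi_slice_lt (rest : List Char) (he : PySem.Chars.find rest [';'] ≠ -1) :
    (PySem.List.slice rest (some (PySem.Chars.find rest [';'] + 1)) none).length < rest.length := by
  have hge : -1 ≤ PySem.Chars.find rest [';'] := PySem.Chars.neg_one_le_find rest [';']
  have h0 : 0 ≤ PySem.Chars.find rest [';'] := by omega
  obtain ⟨hpre, -⟩ := PySem.Chars.find_spec h0
  have hlt : (PySem.Chars.find rest [';']).toNat < rest.length := by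
    have h1 : 1 ≤ (List.drop (PySem.Chars.find rest [';']).toNat rest).length :=
      hpre.length_le
    rw [List.length_drop] at h1
    omega
  rw [PySem.List.slice_from rest (by omega)]
  rw [List.length_drop]
  omega

-- Python B's while-loop: each iteration takes the segment before the next ';' (or the rest),
-- cuts the name before the first ',' (seg.index raises ValueError when there is none — outside Pre_,
-- where the port exits with the accumulators as they stand), the type between it and the next ','.
def bLoop (names types : List String) (rest : List Char) : List String × List String :=
  let e := PySem.Chars.find rest [';']
  let seg := if e = -1 then rest else PySem.List.slice rest none (some e)
  let comma := PySem.Chars.find seg [',']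
  if comma = -1 then (names, types)
  else
    let names' := names ++ [String.ofList (PySem.List.slice seg none (some comma))]
    let fieldrest := PySem.List.slice seg (some (comma + 1)) none
    let nxt := PySem.Chars.find fieldrest [',']
    let types' := types ++
      [String.ofList (if nxt = -1 then fieldrest else PySem.List.slice fieldrest none (some nxt))]
    if he : e = -1 then (names', types')
    else bLoop names' types' (PySem.List.slice rest (some (e + 1)) none)
termination_by rest.length
decreasing_by exact find_semi_slice_lt rest he

def get_alt (string : String) : List (List String) :=
  let nt := bLoop [] [] string.toList
  [nt.1, nt.2]

-- ===== PRECONDITION & SPEC =====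
-- Pre_: every ";"-segment contains a comma (splits into ≥ 2 parts); otherwise BOTH Pythons raise
-- (A an IndexError on k[1], B a ValueError on seg.index(",")) and neither returns a value.
def Pre_get (string : String) : Prop :=
  ∀ seg ∈ pySplit string ";", 2 ≤ (pySplit seg ",").length
instance (string : String) : Decidable (Pre_get string) := by unfold Pre_get; infer_instance
def pvWitness_get : String := "a,b;c,d"

def Spec_get (string : String) (out : List (List String)) : Prop := out = get_alt string
instance (string : String) (out : List (List String)) : Decidable (Spec_get string out) := by unfold Spec_get; infer_instance

-- ===== CLAIM (what is proved, stated in full; the proofs are below) =====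
def Claim_equal_get : Prop := ∀ (string : String), Dom_get string → Pre_get string → Spec_get string (get string)

-- ===== LEMMAS AND PROOFS =====

-- structural single-character split (proof-side reference for PySem.Chars.splitOn with a one-char separator)
def mySplit (c : Char) : List Char → List (List Char)
  | [] => [[]]
  | x :: xs =>
      if x = c then [] :: mySplit c xs
      else match mySplit c xs with
           | [] => [[x]]
           | h :: t => (x :: h) :: t

def modHead (f : List Char → List Char) : List (List Char) → List (List Char)
  | [] => [f []]
  | h :: t => f h :: t

-- first field and second field of a segment (w.r.t. ',')
def p0 (c : Char) (l : List Char) : List Char := l.takeWhile (· ≠ c)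
def p1 (l : List Char) : List Char := p0 ',' ((l.dropWhile (· ≠ ',')).drop 1)

lemma mySplit_ne_nil (c : Char) (l : List Char) : mySplit c l ≠ [] := by
  cases l with
  | nil => simp [mySplit]
  | cons x xs =>
      simp only [mySplit]
      split
      · simp
      · split <;> simp

lemma modHead_id (l : List (List Char)) (h : l ≠ []) : modHead (fun x => [] ++ x) l = l := by
  cases l with
  | nil => exact absurd rfl h
  | cons a t => simp [modHead]

lemma go_eq (c : Char) : ∀ (fuel : Nat) (l cur : List Char) (acc : List (List Char)),
    l.length ≤ fuel →
    PySem.Chars.splitOn.go [c] fuel l cur acc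
      = acc.reverse ++ modHead (fun x => cur.reverse ++ x) (mySplit c l) := by
  intro fuel
  induction fuel with
  | zero =>
      intro l cur acc h
      have : l = [] := by cases l <;> simp_all
      subst this
      rw [PySem.Chars.splitOn.go]
      simp [mySplit, modHead]
  | succ n ih =>
      intro l cur acc h
      cases l with
      | nil =>
          rw [PySem.Chars.splitOn.go]
          simp [mySplit, modHead]
          all_goals omega
      | cons x rest =>
          rw [PySem.Chars.splitOn.go]
          by_cases hx : x = c
          · have hp : ([c].isPrefixOf (x :: rest)) = true := by
              simp [List.isPrefixOf, hx]
            rw [hp]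
            simp only [if_pos, List.length_cons, List.length_nil, List.drop_succ_cons,
              List.drop_zero]
            rw [ih rest [] _ (by simpa using h)]
            simp only [List.reverse_nil]
            rw [modHead_id _ (mySplit_ne_nil c rest)]
            simp [mySplit, modHead, hx]
          · have hpre : ([c].isPrefixOf (x :: rest)) = false := by
              simp [List.isPrefixOf]
              exact fun hc => absurd hc.symm hx
            rw [hpre]
            simp only [Bool.false_eq_true, if_false]
            rw [ih rest (x :: cur) acc (by simpa using h)]
            have hms : mySplit c (x :: rest)
                = modHead (fun y => x :: y) (mySplit c rest) := by
              simp only [mySplit, if_neg hx]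
              cases hr : mySplit c rest with
              | nil => exact absurd hr (mySplit_ne_nil c rest)
              | cons hh tt => simp [modHead]
            rw [hms]
            cases hr : mySplit c rest with
            | nil => exact absurd hr (mySplit_ne_nil c rest)
            | cons hh tt => simp [modHead]

lemma splitOn_single (c : Char) (l : List Char) :
    PySem.Chars.splitOn l [c] = mySplit c l := by
  unfold PySem.Chars.splitOn
  rw [go_eq c (l.length + 1) l [] [] (by omega)]
  simpa using modHead_id _ (mySplit_ne_nil c l)

-- head/tail structure of mySplit
lemma mySplit_struct (c : Char) (l : List Char) :
    mySplit c l = p0 c l ::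
      (if l.contains c then mySplit c ((l.dropWhile (· ≠ c)).drop 1) else []) := by
  induction l with
  | nil => simp [mySplit, p0]
  | cons x xs ih =>
      by_cases hx : x = c
      · subst hx
        simp [mySplit, p0, List.takeWhile, List.dropWhile]
      · have hxb : (x ≠ c) = True := by simp [hx]
        simp only [mySplit, if_neg hx, ih]
        have hcx : ¬ c = x := fun hh => hx hh.symm
        simp [p0, List.takeWhile, List.dropWhile, hx, hcx]

lemma pySplit_eq (s : String) (c : Char) (sep : String) (hsep : sep.toList = [c]) :
    pySplit s sep = (mySplit c s.toList).map String.ofList := by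
  unfold pySplit
  unfold PySem.Str.split?
  rw [hsep]
  simp [PySem.Chars.split?, splitOn_single]

-- the two extracted fields of a segment under Pre_ (segment contains a comma)
lemma fields_of_seg (seg : List Char) (hlen : 2 ≤ (mySplit ',' seg).length) :
    PySem.List.pyGetD ((mySplit ',' seg).map String.ofList) 0 "" = String.ofList (p0 ',' seg)
    ∧ PySem.List.pyGetD ((mySplit ',' seg).map String.ofList) 1 "" = String.ofList (p1 seg) := by
  have hc : seg.contains ',' = true := by
    by_contra hnc
    rw [mySplit_struct] at hlen
    simp at hnc
    simp [hnc] at hlen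
  have h1 := mySplit_struct ',' seg
  rw [hc] at h1
  simp only [if_pos] at h1
  have h2 := mySplit_struct ',' ((seg.dropWhile (· ≠ ',')).drop 1)
  constructor
  · rw [h1]
    simp [pysem]
  · rw [h1, h2]
    simp [pysem, p1]

-- takeWhile/dropWhile vs take/drop/find bookkeeping (specific to the two ports' traversals)
lemma tw_take (p : Char → Bool) (s : List Char) : s.take (s.takeWhile p).length = s.takeWhile p := by
  induction s with
  | nil => simp
  | cons x xs ih => by_cases h : p x <;> simp [List.takeWhile, h, ih]

lemma tw_drop (p : Char → Bool) (s : List Char) : s.drop (s.takeWhile p).length = s.dropWhile p := by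
  induction s with
  | nil => simp
  | cons x xs ih => by_cases h : p x <;> simp [List.takeWhile, List.dropWhile, h, ih]

lemma tw_all (c : Char) (s : List Char) (h : c ∉ s) : s.takeWhile (· ≠ c) = s := by
  induction s with
  | nil => simp
  | cons x xs ih =>
      have hx : x ≠ c := fun hh => h (by simp [hh])
      simp [List.takeWhile, hx]
      exact fun y hy hyc => h (List.mem_cons_of_mem _ (hyc ▸ hy))

lemma tw_lt (c : Char) (s : List Char) :
    ∀ i < (s.takeWhile (· ≠ c)).length, s[i]? ≠ some c := by
  simp only [ne_eq, decide_not]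
  induction s with
  | nil => simp
  | cons x xs ih =>
      intro i hi
      by_cases h : x = c
      · simp [List.takeWhile, h] at hi
      · cases i with
        | zero => simpa using h
        | succ j =>
            simp [List.takeWhile, h] at hi
            simpa using ih j (by omega)

lemma tw_at (c : Char) (s : List Char) (hm : c ∈ s) :
    s[(s.takeWhile (· ≠ c)).length]? = some c := by
  simp only [ne_eq, decide_not]
  induction s with
  | nil => simp at hm
  | cons x xs ih =>
      by_cases h : x = c
      · simp [List.takeWhile, h]
      · have hx : c ∈ xs := by
          rcases List.mem_cons.mp hm with h' | h'
          · exact absurd h'.symm h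
          · exact h'
        simp [List.takeWhile, h, ih hx]

lemma singleton_prefix_drop (c : Char) (s : List Char) (i : Nat) :
    [c] <+: s.drop i ↔ s[i]? = some c := by
  rw [← List.head?_drop]
  cases s.drop i with
  | nil => simp
  | cons a t => simp [List.cons_prefix_cons, eq_comm]

-- s.find(c) for one character: -1 when absent, else the length of the longest c-free prefix
lemma find_single (c : Char) (s : List Char) :
    PySem.Chars.find s [c] = if c ∈ s then (((s.takeWhile (· ≠ c)).length : Int)) else -1 := by
  by_cases hm : c ∈ s
  · have hinf : [c] <:+: s := by
      obtain ⟨l1, l2, rfl⟩ := List.append_of_mem hm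
      exact ⟨l1, l2, by simp⟩
    have h0 : 0 ≤ PySem.Chars.find s [c] := (PySem.Chars.find_nonneg_iff s [c]).2 hinf
    obtain ⟨hpre, hmin⟩ := PySem.Chars.find_spec h0
    set n := (PySem.Chars.find s [c]).toNat with hn
    set t := (s.takeWhile (· ≠ c)).length with ht
    have h1 : s[n]? = some c := (singleton_prefix_drop c s n).1 hpre
    have h2 : ¬ (n < t) := fun h => tw_lt c s n h h1
    have h3 : ¬ (t < n) := fun h => hmin t h ((singleton_prefix_drop c s t).2 (tw_at c s hm))
    have hnt : n = t := by omega
    rw [if_pos hm, ← hnt, hn]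
    omega
  · rw [if_neg hm]
    rw [PySem.Chars.find_eq_neg_one_iff]
    intro ⟨l1, l2, h⟩
    exact hm (by rw [← h]; simp)

-- B's per-segment extraction: under Pre_ the comma is found, the name slice is p0 and the type slice is p1
lemma b_extract (seg : List Char) (h2 : 2 ≤ (mySplit ',' seg).length) :
    PySem.Chars.find seg [','] ≠ -1
    ∧ PySem.List.slice seg none (some (PySem.Chars.find seg [','])) = p0 ',' seg
    ∧ (if PySem.Chars.find (PySem.List.slice seg (some (PySem.Chars.find seg [','] + 1)) none) [','] = -1
       then PySem.List.slice seg (some (PySem.Chars.find seg [','] + 1)) none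
       else PySem.List.slice (PySem.List.slice seg (some (PySem.Chars.find seg [','] + 1)) none) none
              (some (PySem.Chars.find (PySem.List.slice seg (some (PySem.Chars.find seg [','] + 1)) none) [','])))
      = p1 seg := by
  have hc : ',' ∈ seg := by
    by_contra hnc
    rw [mySplit_struct] at h2
    simp [hnc] at h2
  have hfind : PySem.Chars.find seg [','] = ((seg.takeWhile (· ≠ ',')).length : Int) := by
    rw [find_single, if_pos hc]
  have hfr : PySem.List.slice seg (some (PySem.Chars.find seg [','] + 1)) none
      = (seg.dropWhile (· ≠ ',')).drop 1 := by
    rw [hfind, PySem.List.slice_from seg (by omega)]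
    have : ((((seg.takeWhile (· ≠ ',')).length : Int) + 1)).toNat
        = (seg.takeWhile (· ≠ ',')).length + 1 := by omega
    rw [this, ← List.drop_drop, tw_drop]
  refine ⟨by rw [hfind]; omega, ?_, ?_⟩
  · rw [hfind, PySem.List.slice_to seg (by omega)]
    have ht := tw_take (fun x => decide (x ≠ ',')) seg
    simp only [p0, ne_eq, decide_not, Int.toNat_natCast] at ht ⊢
    exact ht
  · rw [hfr]
    set fr := (seg.dropWhile (· ≠ ',')).drop 1 with hfrdef
    by_cases hm : ',' ∈ fr
    · have hf2 : PySem.Chars.find fr [','] = ((fr.takeWhile (· ≠ ',')).length : Int) := by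
        rw [find_single, if_pos hm]
      rw [hf2]
      have hne : ¬ ((fr.takeWhile (· ≠ ',')).length : Int) = -1 := by omega
      rw [if_neg hne, PySem.List.slice_to fr (by omega)]
      have ht := tw_take (fun x => decide (x ≠ ',')) fr
      simp only [p1, p0, ne_eq, decide_not, Int.toNat_natCast, hfrdef] at ht ⊢
      exact ht
    · have hf2 : PySem.Chars.find fr [','] = -1 := by rw [find_single, if_neg hm]
      rw [hf2, if_pos rfl]
      simp only [p1, p0]
      exact (tw_all ',' fr hm).symm

-- B's loop = per-segment field extraction over mySplit ';' rest (strong induction on the remaining length)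
lemma bLoop_eq : ∀ (N : Nat) (rest : List Char), rest.length ≤ N →
    ∀ (names types : List String),
    (∀ seg ∈ mySplit ';' rest, 2 ≤ (mySplit ',' seg).length) →
    bLoop names types rest
      = (names ++ (mySplit ';' rest).map (fun g => String.ofList (p0 ',' g)),
         types ++ (mySplit ';' rest).map (fun g => String.ofList (p1 g))) := by
  intro N
  induction N with
  | zero =>
      intro rest hlen names types h
      have hnil : rest = [] := by cases rest <;> simp_all
      subst hnil
      have := h [] (by simp [mySplit])
      simp [mySplit] at this
  | succ N ih =>
      intro rest hlen names types h
      by_cases hsem : ';' ∈ rest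
      · -- a ';' remains: process the segment before it, recurse past it
        have he : PySem.Chars.find rest [';'] = ((rest.takeWhile (· ≠ ';')).length : Int) := by
          rw [find_single, if_pos hsem]
        have hene : ¬ PySem.Chars.find rest [';'] = -1 := by omega
        have hcont : rest.contains ';' = true := by simpa using hsem
        have hstruct := mySplit_struct ';' rest
        rw [hcont] at hstruct
        simp only [if_pos] at hstruct
        have hseg : PySem.List.slice rest none (some (PySem.Chars.find rest [';']))
            = p0 ';' rest := by
          rw [he, PySem.List.slice_to rest (by omega)]
          have ht := tw_take (fun x => decide (x ≠ ';')) rest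
          simp only [p0, ne_eq, decide_not, Int.toNat_natCast] at ht ⊢
          exact ht
        have hrest' : PySem.List.slice rest (some (PySem.Chars.find rest [';'] + 1)) none
            = (rest.dropWhile (· ≠ ';')).drop 1 := by
          rw [he, PySem.List.slice_from rest (by omega)]
          have : ((((rest.takeWhile (· ≠ ';')).length : Int) + 1)).toNat
              = (rest.takeWhile (· ≠ ';')).length + 1 := by omega
          rw [this, ← List.drop_drop, tw_drop]
        have h2 : 2 ≤ (mySplit ',' (p0 ';' rest)).length :=
          h (p0 ';' rest) (by rw [hstruct]; simp)
        obtain ⟨hcne, hname, htype⟩ := b_extract (p0 ';' rest) h2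
        have hlen' : ((rest.dropWhile (· ≠ ';')).drop 1).length ≤ N := by
          have ht := tw_at ';' rest hsem
          have htl : (rest.takeWhile (· ≠ ';')).length < rest.length := by
            by_contra hge
            rw [List.getElem?_eq_none (by omega)] at ht
            simp at ht
          have := tw_drop (fun x => decide (x ≠ ';')) rest
          have hld : (rest.dropWhile (fun x => decide (x ≠ ';'))).length
              = rest.length - (rest.takeWhile (fun x => decide (x ≠ ';'))).length := by
            rw [← this, List.length_drop]
          simp only [List.length_drop]
          simp only [ne_eq] at hld ⊢
          omega
        have h' : ∀ seg ∈ mySplit ';' ((rest.dropWhile (· ≠ ';')).drop 1),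
            2 ≤ (mySplit ',' seg).length := by
          intro seg hsg
          exact h seg (by
            rw [hstruct]
            exact List.mem_cons_of_mem _ (by simpa [List.drop_one] using hsg))
        rw [bLoop]
        simp only [if_neg hene, hseg, if_neg hcne, dif_neg hene, hname, htype, hrest']
        rw [ih _ hlen' _ _ h']
        rw [hstruct]
        simp
      · -- no ';' left: the whole rest is the last segment
        have he : PySem.Chars.find rest [';'] = -1 := by rw [find_single, if_neg hsem]
        have hcont : rest.contains ';' = false := by simpa using hsem
        have hstruct := mySplit_struct ';' rest
        rw [hcont] at hstruct
        have hp0 : p0 ';' rest = rest := tw_all ';' rest hsem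
        have h2 : 2 ≤ (mySplit ',' rest).length := by
          have := h (p0 ';' rest) (by rw [hstruct]; simp)
          rwa [hp0] at this
        obtain ⟨hcne, hname, htype⟩ := b_extract rest h2
        rw [bLoop]
        simp only [if_pos he, if_neg hcne, dif_pos he, hname, htype]
        rw [hstruct, hp0]
        simp

-- ===== VERDICT (by name: the statement is the Claim_ definition above) =====
theorem get_spec : Claim_equal_get := by
  intro s _ hpre
  unfold Spec_get _root_.get get_alt
  simp only []
  -- A's two-accumulator loop is two maps
  rw [PySem.List.foldl_prod_mk
        (f := fun acc i => acc ++ [PySem.List.pyGetD (pySplit i ",") 0 ""])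
        (g := fun acc i => acc ++ [PySem.List.pyGetD (pySplit i ",") 1 ""])]
  rw [PySem.List.foldl_append_singleton_eq_map, PySem.List.foldl_append_singleton_eq_map]
  -- both sides via mySplit
  have hsemi : pySplit s ";" = (mySplit ';' s.toList).map String.ofList :=
    pySplit_eq s ';' ";" (by decide)
  have hpre' : ∀ seg ∈ mySplit ';' s.toList, 2 ≤ (mySplit ',' seg).length := by
    intro seg hseg
    have := hpre (String.ofList seg) (by rw [hsemi]; exact List.mem_map_of_mem hseg)
    rwa [pySplit_eq (String.ofList seg) ',' "," (by decide), List.length_map,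
      String.toList_ofList] at this
  have hfield : ∀ seg ∈ mySplit ';' s.toList,
      PySem.List.pyGetD (pySplit (String.ofList seg) ",") 0 "" = String.ofList (p0 ',' seg)
      ∧ PySem.List.pyGetD (pySplit (String.ofList seg) ",") 1 "" = String.ofList (p1 seg) := by
    intro seg hseg
    rw [pySplit_eq (String.ofList seg) ',' "," (by decide), String.toList_ofList]
    exact fields_of_seg seg (hpre' seg hseg)
  rw [bLoop_eq s.toList.length s.toList (le_refl _) [] [] hpre']
  simp only [hsemi, List.map_map, List.nil_append, List.cons.injEq, and_true]
  constructor
  · apply List.map_congr_left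
    intro seg hseg
    exact (hfield seg hseg).1
  · apply List.map_congr_left
    intro seg hseg
    exact (hfield seg hseg).2
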